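-- pv_equiv track=rewrite | github.com/angele-d/AOC | 2024/2024_day09part2.py | firstTrou
-- ===== SOURCE A (Python) =====
-- def firstTrou(filesystem) -> (int,int):
--     '''Trouve le 1er trou et renvoie sa coordonnee et la quantite de trous a la suite'''
--     for i in range (len(filesystem)):
--         if filesystem[i] == ".":
--             j = i
--             while j < len(filesystem) and filesystem[j] == ".":
--                 j += 1
--             return i,j-i
--     return -1,-1
-- ===== SOURCE B (Python) =====
-- from itertools import groupby
--
-- def firstTrou(filesystem) -> (int, int):
--     '''Trouve le 1er trou et renvoie sa coordonnee et la quantite de trous a la suite'''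
--     idx = 0
--     for key, group in groupby(filesystem):
--         n = sum(1 for _ in group)
--         if key == ".":
--             return idx, n
--         idx += n
--     return -1, -1
-- ===== Notes on version B (the rewrite author's own statement) =====
-- stated objective: idiomatic
-- what changed: B iterates once over maximal runs via itertools.groupby with a running start index, instead of A's index scan with a nested while-count; no speed claim.
import Mathlib
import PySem

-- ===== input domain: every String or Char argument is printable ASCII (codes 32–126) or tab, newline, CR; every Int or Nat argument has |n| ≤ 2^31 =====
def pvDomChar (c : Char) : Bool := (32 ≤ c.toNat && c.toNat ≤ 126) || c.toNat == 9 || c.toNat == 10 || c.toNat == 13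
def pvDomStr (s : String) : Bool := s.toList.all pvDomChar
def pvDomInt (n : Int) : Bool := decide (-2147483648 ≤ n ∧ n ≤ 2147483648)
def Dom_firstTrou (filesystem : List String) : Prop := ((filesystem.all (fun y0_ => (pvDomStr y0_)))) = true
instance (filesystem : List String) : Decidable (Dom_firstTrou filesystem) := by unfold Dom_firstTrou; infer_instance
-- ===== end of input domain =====

-- B replaces A's index scan with nested while-count by a single pass over maximal
-- runs (itertools.groupby) carrying a running start index; same cost, more idiomatic.

-- ===== PORT A =====
-- inner `while j < len(filesystem) and filesystem[j] == "."` loop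
def pvWhileA (fs : List String) (j : Nat) : Nat :=
  if h : j < fs.length then
    if fs[j] == "." then pvWhileA fs (j + 1) else j
  else j
termination_by fs.length - j

-- outer `for i in range(len(filesystem))` loop
def pvForA (fs : List String) (i : Nat) : Int × Int :=
  if h : i < fs.length then
    if fs[i] == "." then ((i : Int), ((pvWhileA fs i : Nat) : Int) - (i : Int))
    else pvForA fs (i + 1)
  else (-1, -1)
termination_by fs.length - i

def firstTrou (filesystem : List String) : Int × Int := pvForA filesystem 0

-- ===== PORT B =====
-- one step per groupby run: materialize the run length n; return on ".", else skip the run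
def pvGoB : List String → Nat → Int × Int
  | [], _ => (-1, -1)
  | x :: rest, idx =>
    let n := 1 + (rest.takeWhile (· == x)).length
    if x == "." then ((idx : Int), (n : Int))
    else pvGoB (rest.dropWhile (· == x)) (idx + n)
termination_by l _ => l.length
decreasing_by
  simpa using Nat.lt_succ_of_le (List.length_dropWhile_le _ _)

def firstTrou_alt (filesystem : List String) : Int × Int := pvGoB filesystem 0

-- ===== PRECONDITION & SPEC =====
def Spec_firstTrou (filesystem : List String) (out : Int × Int) : Prop := out = firstTrou_alt filesystem
instance (filesystem : List String) (out : Int × Int) : Decidable (Spec_firstTrou filesystem out) := by unfold Spec_firstTrou; infer_instance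

-- ===== CLAIM (what is proved, stated in full; the proofs are below) =====
def Claim_equal_firstTrou : Prop := ∀ (filesystem : List String), Dom_firstTrou filesystem → Spec_firstTrou filesystem (firstTrou filesystem)

-- ===== LEMMAS AND PROOFS =====

-- the inner while loop counts the leading run of "." from position j
theorem pvWhileA_eq (fs : List String) (j : Nat) :
    pvWhileA fs j = j + ((fs.drop j).takeWhile (· == ".")).length := by
  induction j using pvWhileA.induct fs with
  | case1 j h hdot ih =>
      rw [pvWhileA, dif_pos h, if_pos hdot, ih,
        List.drop_eq_getElem_cons h,
        List.takeWhile_cons_of_pos (p := fun s => s == ".") hdot]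
      simp; omega
  | case2 j h hdot =>
      rw [pvWhileA, dif_pos h,
        List.drop_eq_getElem_cons h, List.takeWhile_cons_of_neg (by simpa using hdot)]
      simp [hdot]
  | case3 j h =>
      rw [pvWhileA, dif_neg h, List.drop_eq_nil_of_le (by omega)]
      simp

-- pvGoB skips a run of elements equal to x (x ≠ ".") in one step
theorem pvGoB_skip (rest : List String) (idx : Nat) (x : String) (hx : ¬ (x == ".") = true) :
    pvGoB rest idx = pvGoB (rest.dropWhile (· == x)) (idx + (rest.takeWhile (· == x)).length) := by
  cases rest with
  | nil => simp [pvGoB]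
  | cons y r =>
      by_cases hy : (y == x) = true
      · have hyx : y = x := by simpa using hy
        rw [List.takeWhile_cons_of_pos (p := fun s => s == x) hy,
          List.dropWhile_cons_of_pos (p := fun s => s == x) hy]
        rw [pvGoB, if_neg (by simp_all)]
        subst hyx
        simp [Nat.add_comm]
      · rw [List.takeWhile_cons_of_neg (by simpa using hy),
          List.dropWhile_cons_of_neg (by simpa using hy)]
        simp

-- the outer loop from i equals B's run loop on the suffix from i
theorem pvForA_eq_goB (fs : List String) (i : Nat) :
    pvForA fs i = pvGoB (fs.drop i) i := by
  induction i using pvForA.induct fs with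
  | case1 i h hdot =>
      have heq : fs[i] = "." := by simpa using hdot
      rw [pvForA, dif_pos h, if_pos hdot, pvWhileA_eq,
        List.drop_eq_getElem_cons h, pvGoB, if_pos hdot, heq,
        List.takeWhile_cons_of_pos (p := fun s => s == ".") (by simp)]
      simp; omega
  | case2 i h hdot ih =>
      rw [pvForA, dif_pos h, if_neg hdot, ih,
        List.drop_eq_getElem_cons h, pvGoB, if_neg hdot,
        pvGoB_skip (fs.drop (i + 1)) (i + 1) fs[i] hdot]
      ring_nf
  | case3 i h =>
      rw [pvForA, dif_neg h, List.drop_eq_nil_of_le (by omega)]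
      simp [pvGoB]

-- ===== VERDICT (by name: the statement is the Claim_ definition above) =====
theorem firstTrou_spec : Claim_equal_firstTrou := by
  intro fs _
  unfold Spec_firstTrou firstTrou firstTrou_alt
  simpa using pvForA_eq_goB fs 0
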